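-- pv_equiv track=rewrite | github.com/KiranPal18/ISRO-InterIIT-14.0 | app/spatial_reasoning.py | _extract_direction_from_match
-- ===== SOURCE A (Python) =====
-- from typing import Dict, List, Tuple, Optional, Any
--
-- def _extract_direction_from_match(text: str) -> Optional[str]:
--     """Extract the direction (left, right, top, bottom) from a matched spatial phrase."""
--     text = text.lower()
--
--     # Check for combined directions first
--     if 'far' in text or 'very' in text or 'extreme' in text:
--         if 'left' in text:
--             return 'far-left'
--         elif 'right' in text:
--             return 'far-right'
--         elif 'top' in text:
--             return 'far-top'
--         elif 'bottom' in text: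
--             return 'far-bottom'
--
--     # Check for row/column patterns
--     if 'row' in text:
--         if 'top' in text or 'first' in text:
--             return 'top'
--         elif 'bottom' in text or 'last' in text:
--             return 'bottom'
--
--     if 'column' in text:
--         if 'left' in text or 'first' in text:
--             return 'left'
--         elif 'right' in text or 'last' in text:
--             return 'right'
--
--     # Single directions
--     for direction in ['left', 'right', 'top', 'bottom']:
--         if direction in text:
--             return direction
--
--     return None
--
--     # Deduplicate overlapping matches, keeping highest priority
--     results = _deduplicate_spatial_results(results)
--
--     return sorted(results, key=lambda x: -x['priority'])
--
-- def _deduplicate_spatial_results(results: List[Dict]) -> List[Dict]: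
--     """Remove overlapping matches, keeping highest priority."""
--     if not results:
--         return results
--
--     # Sort by priority descending
--     results = sorted(results, key=lambda x: -x['priority'])
--
--     kept = []
--     used_spans = []
--
--     for r in results:
--         span = r['span']
--         overlaps = False
--         for used in used_spans:
--             if not (span[1] <= used[0] or span[0] >= used[1]):
--                 overlaps = True
--                 break
--
--         if not overlaps:
--             kept.append(r)
--             used_spans.append(span)
--
--     return kept
-- ===== SOURCE B (Python) =====
-- from typing import Optional
--
-- def _extract_direction_from_match(text: str) -> Optional[str]:
--     """Collect every applicable (precedence, result) candidate, then select the best.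
--
--     Instead of short-circuiting through an if/elif cascade, build the full list of
--     rule hits with a numeric precedence mirroring the cascade order and take the
--     minimum; a trigger present with no matching alias simply contributes nothing,
--     which reproduces the fallthrough for free."""
--     t = text.lower()
--     cands = []
--     if any(m in t for m in ('far', 'very', 'extreme')):
--         cands += [(i, 'far-' + d)
--                   for i, d in enumerate(('left', 'right', 'top', 'bottom')) if d in t]
--     if 'row' in t:
--         cands += [(4 + i, r)
--                   for i, (aliases, r) in enumerate(((('top', 'first'), 'top'),
--                                                     (('bottom', 'last'), 'bottom')))
--                   if any(a in t for a in aliases)]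
--     if 'column' in t:
--         cands += [(6 + i, r)
--                   for i, (aliases, r) in enumerate(((('left', 'first'), 'left'),
--                                                     (('right', 'last'), 'right')))
--                   if any(a in t for a in aliases)]
--     cands += [(8 + i, d)
--               for i, d in enumerate(('left', 'right', 'top', 'bottom')) if d in t]
--     return min(cands)[1] if cands else None
-- ===== Notes on version B (the rewrite author's own statement) =====
-- stated objective: alternative
-- what changed: Instead of A's short-circuiting if/elif cascade with early returns, B collects every applicable rule hit as a (precedence, result) candidate via comprehensions and returns the minimum-precedence one (min of tuples), which reproduces the cascade order and the trigger-without-alias fallthrough by construction.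
import Mathlib
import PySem

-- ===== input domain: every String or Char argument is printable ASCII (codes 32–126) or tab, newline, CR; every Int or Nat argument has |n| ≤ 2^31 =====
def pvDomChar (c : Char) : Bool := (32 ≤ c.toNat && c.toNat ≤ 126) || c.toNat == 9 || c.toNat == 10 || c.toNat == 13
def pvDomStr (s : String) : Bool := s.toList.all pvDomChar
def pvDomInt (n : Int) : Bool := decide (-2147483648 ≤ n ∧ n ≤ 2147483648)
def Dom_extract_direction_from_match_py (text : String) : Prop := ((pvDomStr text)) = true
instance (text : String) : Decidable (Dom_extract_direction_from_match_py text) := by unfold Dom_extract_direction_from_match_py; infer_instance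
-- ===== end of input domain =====

-- B replaces A's short-circuiting if/elif cascade by collecting every applicable (precedence, result) candidate and selecting the minimum (alternative decomposition; same cost).

-- ===== PORT A =====
-- A's sequential returns become helper calls: each block falls through to the next on no match.
def pyA_single (ds : List String) (t : String) : Option String :=
  match ds with
  | [] => none
  | d :: rest => if PySem.Str.isIn d t then some d else pyA_single rest t

def pyA_cols (t : String) : Option String :=
  if PySem.Str.isIn "column" t then
    if PySem.Str.isIn "left" t || PySem.Str.isIn "first" t then some "left"
    else if PySem.Str.isIn "right" t || PySem.Str.isIn "last" t then some "right"
    else pyA_single ["left", "right", "top", "bottom"] t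
  else pyA_single ["left", "right", "top", "bottom"] t

def pyA_rows (t : String) : Option String :=
  if PySem.Str.isIn "row" t then
    if PySem.Str.isIn "top" t || PySem.Str.isIn "first" t then some "top"
    else if PySem.Str.isIn "bottom" t || PySem.Str.isIn "last" t then some "bottom"
    else pyA_cols t
  else pyA_cols t

def extract_direction_from_match_py (text : String) : Option String :=
  let t := PySem.Str.lower text
  if PySem.Str.isIn "far" t || PySem.Str.isIn "very" t || PySem.Str.isIn "extreme" t then
    if PySem.Str.isIn "left" t then some "far-left"
    else if PySem.Str.isIn "right" t then some "far-right"
    else if PySem.Str.isIn "top" t then some "far-top"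
    else if PySem.Str.isIn "bottom" t then some "far-bottom"
    else pyA_rows t
  else pyA_rows t

-- ===== PORT B =====
def pvAnyIn (subs : List String) (t : String) : Bool := subs.any (fun s => PySem.Str.isIn s t)

-- the four comprehensions of Source B (enumerate + filter + map)
def pvB_cands (t : String) : List (Int × String) :=
  (if pvAnyIn ["far", "very", "extreme"] t then
     ((PySem.List.enumerate ["left", "right", "top", "bottom"] 0).filter
        (fun p => PySem.Str.isIn p.2 t)).map (fun p => (p.1, "far-" ++ p.2))
   else [])
  ++ (if PySem.Str.isIn "row" t then
        ((PySem.List.enumerate [((["top", "first"] : List String), "top"),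
                                ((["bottom", "last"] : List String), "bottom")] 0).filter
           (fun p => pvAnyIn p.2.1 t)).map (fun p => (4 + p.1, p.2.2))
      else [])
  ++ (if PySem.Str.isIn "column" t then
        ((PySem.List.enumerate [((["left", "first"] : List String), "left"),
                                ((["right", "last"] : List String), "right")] 0).filter
           (fun p => pvAnyIn p.2.1 t)).map (fun p => (6 + p.1, p.2.2))
      else [])
  ++ ((PySem.List.enumerate ["left", "right", "top", "bottom"] 0).filter
        (fun p => PySem.Str.isIn p.2 t)).map (fun p => (8 + p.1, p.2))

-- Source B's min(cands) compares tuples; the precedence components are pairwise distinct,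
-- so Python's tuple-min equals the first element minimal in the first component (exact here).
def extract_direction_from_match_py_alt (text : String) : Option String :=
  let t := PySem.Str.lower text
  match PySem.List.min? (pvB_cands t) (fun p => p.1) with
  | some m => some m.2
  | none => none

-- ===== PRECONDITION & SPEC =====
def Spec_extract_direction_from_match_py (text : String) (out : Option String) : Prop := out = extract_direction_from_match_py_alt text
instance (text : String) (out : Option String) : Decidable (Spec_extract_direction_from_match_py text out) := by unfold Spec_extract_direction_from_match_py; infer_instance

-- ===== CLAIM =====
def Claim_equal_extract_direction_from_match_py : Prop := ∀ (text : String), Dom_extract_direction_from_match_py text → Spec_extract_direction_from_match_py text (extract_direction_from_match_py text)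

-- ===== LEMMAS AND PROOFS =====
-- ===== VERDICT =====
theorem extract_direction_from_match_py_spec : Claim_equal_extract_direction_from_match_py := by
  intro text _
  unfold Spec_extract_direction_from_match_py
  unfold extract_direction_from_match_py extract_direction_from_match_py_alt
  simp only [pvB_cands, pvAnyIn, pyA_rows, pyA_cols, pyA_single,
    PySem.List.enumerate_cons, PySem.List.enumerate_nil,
    List.filter_cons, List.filter_nil,
    List.any_cons, List.any_nil, Bool.or_false]
  generalize PySem.Str.isIn "far" (PySem.Str.lower text) = b1
  generalize PySem.Str.isIn "very" (PySem.Str.lower text) = b2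
  generalize PySem.Str.isIn "extreme" (PySem.Str.lower text) = b3
  generalize PySem.Str.isIn "left" (PySem.Str.lower text) = b4
  generalize PySem.Str.isIn "right" (PySem.Str.lower text) = b5
  generalize PySem.Str.isIn "top" (PySem.Str.lower text) = b6
  generalize PySem.Str.isIn "bottom" (PySem.Str.lower text) = b7
  generalize PySem.Str.isIn "row" (PySem.Str.lower text) = b8
  generalize PySem.Str.isIn "first" (PySem.Str.lower text) = b9
  generalize PySem.Str.isIn "last" (PySem.Str.lower text) = b10
  generalize PySem.Str.isIn "column" (PySem.Str.lower text) = b11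
  revert b1 b2 b3 b4 b5 b6 b7 b8 b9 b10 b11
  decide
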